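-- pv_equiv track=rewrite | github.com/JVSC/Quine-Maccluskey-Python-Implementation | main.py | essential
-- ===== SOURCE A (Python) =====
-- from collections import Counter
--
-- def essential(expressions):
--     counter = []
--     essential = []
--
--     for term in expressions:
--         counter.extend(term['minterms'])
--     counting = Counter(counter)
--
--     for x in counting:
--         if (counting[x] == 1):
--             essential.append(x)
--
--     return essential
-- ===== SOURCE B (Python) =====
-- def essential(expressions):
--     stream = [x for term in expressions for x in term['minterms']]
--     return [x for i, x in enumerate(stream)
--             if x not in stream[:i] and x not in stream[i + 1:]]
-- ===== Notes on version B (the rewrite author's own statement) =====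
-- stated objective: alternative
-- what changed: Drops the Counter tally entirely: B flattens the minterms into one stream and keeps an element exactly when it occurs nowhere else, tested by membership in the prefix slice stream[:i] and suffix slice stream[i+1:] at each position.
import Mathlib
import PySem

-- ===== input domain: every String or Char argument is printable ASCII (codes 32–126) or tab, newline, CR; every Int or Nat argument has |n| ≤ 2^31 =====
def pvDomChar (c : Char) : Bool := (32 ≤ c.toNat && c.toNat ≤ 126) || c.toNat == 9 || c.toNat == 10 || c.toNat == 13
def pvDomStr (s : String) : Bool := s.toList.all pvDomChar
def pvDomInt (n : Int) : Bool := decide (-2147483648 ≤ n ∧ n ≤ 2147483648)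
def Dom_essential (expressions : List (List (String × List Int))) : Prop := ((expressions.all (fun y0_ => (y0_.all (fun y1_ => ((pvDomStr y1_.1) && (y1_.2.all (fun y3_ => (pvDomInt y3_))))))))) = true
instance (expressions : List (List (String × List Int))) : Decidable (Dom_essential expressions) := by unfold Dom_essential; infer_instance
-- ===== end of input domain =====

-- B drops A's Counter tally: it flattens the minterms into one stream and keeps an element
-- exactly when it is absent from both the prefix and the suffix slice around its position
-- (alternative algorithm: nested membership scans instead of hashing; quadratic, not faster).

-- ===== PORT A =====
def essential (expressions : List (List (String × List Int))) : List Int :=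
  -- counter.extend(term['minterms'])  (Pre_ guarantees the key is present, so getD never takes its default)
  let counterList : List Int :=
    expressions.foldl (fun acc term => acc ++ (PySem.Dict.mk term).getD "minterms" []) []
  let counting : PySem.Dict Int Int := PySem.Dict.counter counterList
  counting.keys.foldl (fun ess x => if counting.getD x 0 == 1 then ess ++ [x] else ess) []

-- ===== PORT B =====
def essential_alt (expressions : List (List (String × List Int))) : List Int :=
  let stream : List Int :=
    expressions.flatMap (fun term => (PySem.Dict.mk term).getD "minterms" [])
  ((PySem.List.enumerate stream).filter (fun p =>
      !((PySem.List.slice stream none (some p.1)).contains p.2) &&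
      !((PySem.List.slice stream (some (p.1 + 1)) none).contains p.2))).map (fun p => p.2)

-- ===== PRECONDITION & SPEC =====
-- Pre_ excludes exactly the inputs where term['minterms'] raises KeyError in Python A (B raises there too).
def Pre_essential (expressions : List (List (String × List Int))) : Prop :=
  (expressions.all (fun term => (PySem.Dict.mk term).contains "minterms")) = true
instance (expressions : List (List (String × List Int))) : Decidable (Pre_essential expressions) := by unfold Pre_essential; infer_instance

def pvWitness_essential : (List (List (String × List Int))) :=
  [[("minterms", [1, 2]), ("other", [])], [("minterms", [2, 3])]]

def Spec_essential (expressions : List (List (String × List Int))) (out : List Int) : Prop := out = essential_alt expressions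
instance (expressions : List (List (String × List Int))) (out : List Int) : Decidable (Spec_essential expressions out) := by unfold Spec_essential; infer_instance

-- ===== CLAIM (what is proved, stated in full; the proofs are below) =====
def Claim_equal_essential : Prop := ∀ (expressions : List (List (String × List Int))), Dom_essential expressions → Pre_essential expressions → Spec_essential expressions (essential expressions)

-- ===== LEMMAS AND PROOFS =====

-- the flattened stream both programs traverse
def pvL (expressions : List (List (String × List Int))) : List Int :=
  expressions.flatMap (fun term => (PySem.Dict.mk term).getD "minterms" [])

-- A's result, characterised: dedup of the stream, filtered by count == 1
lemma pv_essential_eq (e : List (List (String × List Int))) :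
    essential e = (PySem.Set.ofList (pvL e)).filter
      (fun x => ((pvL e).count x : Int) == 1) := by
  unfold essential
  rw [PySem.List.foldl_append_eq_flatMap]
  rw [show List.flatMap (fun term => (PySem.Dict.mk term).getD "minterms" []) e = pvL e from rfl]
  simp only [List.nil_append]
  refine (PySem.List.foldl_append_if_eq_filter
    (fun x => (PySem.Dict.counter (pvL e)).getD x 0 == 1)
    (PySem.Dict.counter (pvL e)).keys []).trans ?_
  rw [PySem.Dict.keys_counter]
  simp only [List.nil_append]
  apply List.filter_congr
  intro x _
  rw [PySem.Dict.getD_counter]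

-- position k holds a globally unique element iff it is absent from both surrounding slices
lemma pv_count_one_iff (L : List Int) (k : Nat) (hk : k < L.length) :
    (L[k] ∉ L.take k ∧ L[k] ∉ L.drop (k + 1)) ↔ L.count L[k] = 1 := by
  have hsplit : L = L.take k ++ L[k] :: L.drop (k + 1) := by
    conv_lhs => rw [← List.take_append_drop k L]
    rw [List.drop_eq_getElem_cons hk]
  generalize hv : L[k] = v at hsplit ⊢
  have hc : L.count v = (L.take k).count v + (1 + (L.drop (k + 1)).count v) := by
    conv_lhs => rw [hsplit]
    simp [List.count_append]
    omega
  constructor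
  · rintro ⟨h1, h2⟩
    rw [hc, List.count_eq_zero.mpr h1, List.count_eq_zero.mpr h2]
  · intro h
    constructor
    · intro hm
      have := List.count_pos_iff.mpr hm
      omega
    · intro hm
      have := List.count_pos_iff.mpr hm
      omega

-- B's scan over any stream, characterised: the stream filtered by count == 1
lemma pv_scan_eq (L : List Int) :
    ((PySem.List.enumerate L).filter (fun p =>
        !((PySem.List.slice L none (some p.1)).contains p.2) &&
        !((PySem.List.slice L (some (p.1 + 1)) none).contains p.2))).map (fun p => p.2)
      = L.filter (fun x => decide (L.count x = 1)) := by
  have hcong : (PySem.List.enumerate L).filter (fun p =>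
      !((PySem.List.slice L none (some p.1)).contains p.2) &&
      !((PySem.List.slice L (some (p.1 + 1)) none).contains p.2))
      = (PySem.List.enumerate L).filter (fun p => decide (L.count p.2 = 1)) := by
    apply List.filter_congr
    intro p hp
    rcases (PySem.List.mem_enumerate_iff L 0 p).mp hp with ⟨k, hk, rfl⟩
    simp only [zero_add]
    have h1 : PySem.List.slice L none (some (k : Int)) = L.take k :=
      PySem.List.slice_to_natCast L k
    have h2 : PySem.List.slice L (some ((k : Int) + 1)) none = L.drop (k + 1) := by
      rw [show ((k : Int) + 1) = ((k + 1 : Nat) : Int) by push_cast; ring]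
      exact PySem.List.slice_from_natCast L (k + 1)
    rw [h1, h2]
    simp only [List.contains_eq_mem, ← decide_not, ← Bool.decide_and, decide_eq_decide]
    exact pv_count_one_iff L k hk
  rw [hcong]
  rw [show (fun p : Int × Int => decide (List.count p.2 L = 1))
        = ((fun x => decide (List.count x L = 1)) ∘ (fun p : Int × Int => p.2)) from rfl]
  rw [← List.filter_map, PySem.List.map_snd_enumerate]

-- B's result, characterised
lemma pv_essential_alt_eq (e : List (List (String × List Int))) :
    essential_alt e = (pvL e).filter (fun x => decide ((pvL e).count x = 1)) :=
  pv_scan_eq (pvL e)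

-- filtering the first-occurrence dedup by a predicate only true of count-≤-1 elements
-- equals filtering the list itself
lemma pv_filter_ofList (L : List Int) (p : Int → Bool)
    (hp : ∀ x, p x = true → L.count x ≤ 1) :
    (PySem.Set.ofList L).filter p = L.filter p := by
  induction L with
  | nil => rfl
  | cons x t ih =>
    have ht : ∀ y, p y = true → t.count y ≤ 1 := by
      intro y hy
      have h1 := hp y hy
      have h2 : t.count y ≤ (x :: t).count y := by
        simp only [List.count_cons]
        omega
      omega
    rw [PySem.Set.ofList_cons]
    by_cases hx : p x = true
    · have hcnt := hp x hx
      have hxt : x ∉ t := by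
        intro hm
        have h3 := List.count_pos_iff.mpr hm
        rw [List.count_cons_self] at hcnt
        omega
      have hxol : x ∉ PySem.Set.ofList t :=
        fun h => hxt ((PySem.Set.mem_ofList t x).mp h)
      have hdis : PySem.Set.discard (PySem.Set.ofList t) x = PySem.Set.ofList t := by
        simp only [PySem.Set.discard]
        apply List.filter_eq_self.mpr
        intro y hy
        have hyx : y ≠ x := by rintro rfl; exact hxol hy
        simp [hyx]
      simp only [List.filter_cons, hx, if_true, hdis, ih ht]
    · have hxf : p x = false := eq_false_of_ne_true hx
      have hdisf : (PySem.Set.discard (PySem.Set.ofList t) x).filter p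
          = (PySem.Set.ofList t).filter p := by
        simp only [PySem.Set.discard, List.filter_filter]
        apply List.filter_congr
        intro y _
        cases hpy : p y
        · simp
        · have hyx : y ≠ x := by
            rintro rfl
            rw [hpy] at hxf
            cases hxf
          simp [hyx]
      simp only [List.filter_cons, hxf, Bool.false_eq_true, if_false, hdisf, ih ht]

-- ===== VERDICT (by name: the statement is the Claim_ definition above) =====
theorem essential_spec : Claim_equal_essential := by
  intro e _ _
  unfold Spec_essential
  rw [pv_essential_eq, pv_essential_alt_eq]
  have hpred : (fun x => ((pvL e).count x : Int) == 1) = (fun x => decide ((pvL e).count x = 1)) := by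
    funext x
    by_cases h : (pvL e).count x = 1
    · simp [h]
    · have : ((pvL e).count x : Int) ≠ 1 := by exact_mod_cast h
      simp [h, this]
  rw [hpred]
  apply pv_filter_ofList
  intro x hx
  simp only [decide_eq_true_eq] at hx
  omega
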